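-- pv_equiv track=rewrite | github.com/jsbattig/code-indexer | tests/e2e/quality/chunk_analysis_tools.py | _is_meaningful_chunk
-- ===== SOURCE A (Python) =====
-- def _is_meaningful_chunk(text: str) -> bool:
--     """Determine if a chunk contains meaningful code vs fragments.
--
--     A meaningful chunk should:
--     - Be long enough to provide context (> 200 chars)
--     - Contain more than just imports or package declarations
--     - Have some logical structure or implementation
--     """
--     # Too short to be meaningful
--     if len(text) < 200:
--         return False
--
--     lines = text.split("\n")
--     code_lines = [
--         line.strip()
--         for line in lines
--         if line.strip() and not line.strip().startswith("#")
--     ]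
--
--     if len(code_lines) < 3:
--         return False
--
--     # Check for fragment indicators
--     fragment_patterns = [
--         # Just imports/packages
--         lambda lines: all(
--             line.startswith(("import ", "from ", "package ", "using "))
--             or line in ["", "{", "}", "/**", "*/"]
--             or line.startswith(("*", "//", "/*"))
--             for line in lines
--         ),
--         # Just variable declarations
--         lambda lines: all(
--             "=" in line and ";" in line and len(line.split()) < 5
--             for line in lines
--             if line and not line.startswith(("import", "from", "package"))
--         ),
--         # Just class/interface declarations without implementation
--         lambda lines: len(
--             [
--                 line
--                 for line in lines
--                 if any(
--                     keyword in line
--                     for keyword in [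
--                         "class ",
--                         "interface ",
--                         "struct ",
--                         "def ",
--                         "function ",
--                     ]
--                 )
--             ]
--         )
--         > 0
--         and len(
--             [
--                 line
--                 for line in lines
--                 if "{" in line or "return " in line or "if " in line
--             ]
--         )
--         == 0,
--     ]
--
--     # If any fragment pattern matches, it's not meaningful
--     for pattern in fragment_patterns:
--         if pattern(code_lines):
--             return False
--
--     return True
-- ===== SOURCE B (Python) =====
-- def _import_like(line):
--     return (line.startswith(("import ", "from ", "package ", "using "))
--             or line in ("{", "}", "/**", "*/")
--             or line.startswith(("*", "//", "/*")))
--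
--
-- def _vardecl_ok(line):
--     return (line.startswith(("import", "from", "package"))
--             or ("=" in line and ";" in line and len(line.split()) < 5))
--
--
-- def _is_meaningful_chunk(text: str) -> bool:
--     if len(text) < 200:
--         return False
--     # Single short-circuiting streaming scan: never materializes the filtered
--     # line list; stops as soon as the outcome is fully determined.
--     n = 0
--     non_import_seen = False
--     non_vardecl_seen = False
--     decl_seen = False
--     impl_seen = False
--     for raw in text.split("\n"):
--         line = raw.strip()
--         if not line or line.startswith("#"):
--             continue
--         n += 1
--         non_import_seen = non_import_seen or not _import_like(line)
--         non_vardecl_seen = non_vardecl_seen or not _vardecl_ok(line)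
--         decl_seen = decl_seen or any(
--             k in line for k in ("class ", "interface ", "struct ", "def ", "function ")
--         )
--         impl_seen = impl_seen or "{" in line or "return " in line or "if " in line
--         if n >= 3 and non_import_seen and non_vardecl_seen and impl_seen:
--             # outcome can no longer change: the chunk is meaningful
--             return True
--     return (n >= 3 and non_import_seen and non_vardecl_seen
--             and (impl_seen or not decl_seen))
-- ===== Notes on version B (the rewrite author's own statement) =====
-- stated objective: alternative
-- what changed: Replaces A's materialize-then-multipass design (build the stripped/filtered code_lines list, then run three separate fragment-pattern predicates over it) by a single short-circuiting streaming scan over the raw lines that strips and classifies each line once, counts code lines on the fly, and returns True early as soon as the verdict is determined, never building the intermediate list.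
import Mathlib
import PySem

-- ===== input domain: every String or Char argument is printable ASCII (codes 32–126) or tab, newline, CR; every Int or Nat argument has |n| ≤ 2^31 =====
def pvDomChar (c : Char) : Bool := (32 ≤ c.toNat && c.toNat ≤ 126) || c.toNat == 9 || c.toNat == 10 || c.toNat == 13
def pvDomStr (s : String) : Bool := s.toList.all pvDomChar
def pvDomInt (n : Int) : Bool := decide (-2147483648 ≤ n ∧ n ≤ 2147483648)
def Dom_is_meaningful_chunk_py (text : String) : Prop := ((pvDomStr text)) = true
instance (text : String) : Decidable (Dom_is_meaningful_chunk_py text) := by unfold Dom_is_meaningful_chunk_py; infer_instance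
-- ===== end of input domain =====

-- B replaces A's build-list-then-three-passes design by one short-circuiting streaming
-- scan over the raw lines (alternative decomposition); return values proved equal.
-- ===== PORT A =====
def is_meaningful_chunk_py (text : String) : Bool :=
  if PySem.Str.len text < 200 then false
  else
    let code_lines := (((PySem.Str.split? text "\n").getD []).map PySem.Str.strip).filter
      (fun l => l != "" && !(PySem.Str.startswith l "#"))
    if code_lines.length < 3 then false
    else
      let pattern1 := code_lines.all (fun l =>
        (PySem.Str.startswith l "import " || PySem.Str.startswith l "from " ||
         PySem.Str.startswith l "package " || PySem.Str.startswith l "using ") ||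
        (l == "" || l == "{" || l == "}" || l == "/**" || l == "*/") ||
        (PySem.Str.startswith l "*" || PySem.Str.startswith l "//" || PySem.Str.startswith l "/*"))
      let pattern2 := (code_lines.filter (fun l =>
          l != "" && !(PySem.Str.startswith l "import" || PySem.Str.startswith l "from" ||
                       PySem.Str.startswith l "package"))).all
        (fun l => PySem.Str.isIn "=" l && PySem.Str.isIn ";" l &&
                  decide ((PySem.Str.split₀ l).length < 5))
      let pattern3 :=
        decide (0 < (code_lines.filter (fun l =>
          ["class ", "interface ", "struct ", "def ", "function "].any
            (fun k => PySem.Str.isIn k l))).length) &&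
        decide ((code_lines.filter (fun l =>
          PySem.Str.isIn "{" l || PySem.Str.isIn "return " l || PySem.Str.isIn "if " l)).length = 0)
      if pattern1 then false
      else if pattern2 then false
      else if pattern3 then false
      else true

-- ===== PORT B =====
-- per-line predicates of B (helpers _import_like / _vardecl_ok in Source B, plus the inline tests)
def altImportLike (l : String) : Bool :=
  (PySem.Str.startswith l "import " || PySem.Str.startswith l "from " ||
   PySem.Str.startswith l "package " || PySem.Str.startswith l "using ") ||
  (l == "{" || l == "}" || l == "/**" || l == "*/") ||
  (PySem.Str.startswith l "*" || PySem.Str.startswith l "//" || PySem.Str.startswith l "/*")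

def altVarDeclOk (l : String) : Bool :=
  (PySem.Str.startswith l "import" || PySem.Str.startswith l "from" ||
   PySem.Str.startswith l "package") ||
  (PySem.Str.isIn "=" l && PySem.Str.isIn ";" l && decide ((PySem.Str.split₀ l).length < 5))

def altDecl (l : String) : Bool :=
  ["class ", "interface ", "struct ", "def ", "function "].any (fun k => PySem.Str.isIn k l)

def altImpl (l : String) : Bool :=
  PySem.Str.isIn "{" l || PySem.Str.isIn "return " l || PySem.Str.isIn "if " l

-- B's streaming loop: raw lines still to scan, count of code lines so far, the four flags;
-- returns true early as soon as the verdict is determined (Source B's early `return True`).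
def altLoop : List String → Nat → Bool → Bool → Bool → Bool → Bool
  | [], n, sni, snv, hd, hi => decide (3 ≤ n) && sni && snv && (hi || !hd)
  | raw :: rest, n, sni, snv, hd, hi =>
      let line := PySem.Str.strip raw
      if line == "" || PySem.Str.startswith line "#" then altLoop rest n sni snv hd hi
      else
        let n' := n + 1
        let sni' := sni || !altImportLike line
        let snv' := snv || !altVarDeclOk line
        let hd' := hd || altDecl line
        let hi' := hi || altImpl line
        if decide (3 ≤ n') && sni' && snv' && hi' then true
        else altLoop rest n' sni' snv' hd' hi'

def is_meaningful_chunk_py_alt (text : String) : Bool :=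
  if PySem.Str.len text < 200 then false
  else altLoop ((PySem.Str.split? text "\n").getD []) 0 false false false false

-- ===== PRECONDITION & SPEC =====
def Spec_is_meaningful_chunk_py (text : String) (out : Bool) : Prop := out = is_meaningful_chunk_py_alt text
instance (text : String) (out : Bool) : Decidable (Spec_is_meaningful_chunk_py text out) := by unfold Spec_is_meaningful_chunk_py; infer_instance

-- ===== CLAIM (what is proved, stated in full; the proofs are below) =====
def Claim_equal_is_meaningful_chunk_py : Prop := ∀ (text : String), Dom_is_meaningful_chunk_py text → Spec_is_meaningful_chunk_py text (is_meaningful_chunk_py text)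

-- ===== LEMMAS AND PROOFS =====

-- the code lines contributed by a suffix of raw lines
def codeOf (xs : List String) : List String :=
  (xs.map PySem.Str.strip).filter (fun l => l != "" && !(PySem.Str.startswith l "#"))

theorem codeOf_cons (x : String) (xs : List String) :
    codeOf (x :: xs) =
      if (PySem.Str.strip x != "" && !(PySem.Str.startswith (PySem.Str.strip x) "#")) = true
      then PySem.Str.strip x :: codeOf xs else codeOf xs := by
  simp only [codeOf, List.map_cons, List.filter_cons]

-- closed form of B's loop: the early exit never changes the answer (all flags are monotone)
theorem altLoop_eq (xs : List String) (n : Nat) (a b c d : Bool) :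
    altLoop xs n a b c d =
      (decide (3 ≤ n + (codeOf xs).length) &&
       (a || (codeOf xs).any (fun l => !altImportLike l)) &&
       (b || (codeOf xs).any (fun l => !altVarDeclOk l)) &&
       ((d || (codeOf xs).any altImpl) || !(c || (codeOf xs).any altDecl))) := by
  induction xs generalizing n a b c d with
  | nil => simp [altLoop, codeOf]
  | cons x xs ih =>
    by_cases h : (PySem.Str.strip x == "" || PySem.Str.startswith (PySem.Str.strip x) "#") = true
    · have hpred : (PySem.Str.strip x != "" && !(PySem.Str.startswith (PySem.Str.strip x) "#")) = false := by
        cases hA : (PySem.Str.strip x == "") <;>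
          cases hB : PySem.Str.startswith (PySem.Str.strip x) "#" <;> simp_all [bne]
      rw [show altLoop (x :: xs) n a b c d = altLoop xs n a b c d from by
            simp only [altLoop, h, if_true], ih, codeOf_cons, hpred]
      simp
    · have hb2 : (PySem.Str.strip x == "" || PySem.Str.startswith (PySem.Str.strip x) "#") = false :=
        eq_false_of_ne_true h
      have hpred : (PySem.Str.strip x != "" && !(PySem.Str.startswith (PySem.Str.strip x) "#")) = true := by
        cases hA : (PySem.Str.strip x == "") <;>
          cases hB : PySem.Str.startswith (PySem.Str.strip x) "#" <;> simp_all [bne]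
      rw [codeOf_cons, if_pos hpred]
      rw [show altLoop (x :: xs) n a b c d =
            (if (decide (3 ≤ n + 1) && (a || !altImportLike (PySem.Str.strip x)) &&
                 (b || !altVarDeclOk (PySem.Str.strip x)) &&
                 (d || altImpl (PySem.Str.strip x))) = true then true
             else altLoop xs (n + 1) (a || !altImportLike (PySem.Str.strip x))
               (b || !altVarDeclOk (PySem.Str.strip x)) (c || altDecl (PySem.Str.strip x))
               (d || altImpl (PySem.Str.strip x))) from by
            simp only [altLoop, hb2, Bool.false_eq_true, if_false]]
      by_cases hg : (decide (3 ≤ n + 1) && (a || !altImportLike (PySem.Str.strip x)) &&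
          (b || !altVarDeclOk (PySem.Str.strip x)) && (d || altImpl (PySem.Str.strip x))) = true
      · rw [if_pos hg]
        simp only [Bool.and_eq_true, decide_eq_true_eq] at hg
        obtain ⟨⟨⟨h3, ha⟩, hb⟩, hd⟩ := hg
        have hn : decide (3 ≤ n + (PySem.Str.strip x :: codeOf xs).length) = true := by
          simp only [List.length_cons, decide_eq_true_eq]; omega
        symm
        simp only [List.any_cons, hn, ← Bool.or_assoc, ha, hb, hd,
          Bool.true_or, Bool.and_self]
      · rw [if_neg hg, ih]
        simp only [List.any_cons, List.length_cons, Bool.or_assoc]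
        have hnn : n + 1 + (codeOf xs).length = n + ((codeOf xs).length + 1) := by omega
        rw [hnn]
        rfl

theorem all_filter' (p q : String → Bool) (xs : List String) :
    (xs.filter p).all q = xs.all (fun x => !p x || q x) := by
  induction xs with
  | nil => rfl
  | cons x xs ih =>
    by_cases h : p x = true <;> simp [h, ih]

theorem filter_pos_iff_any (p : String → Bool) (xs : List String) :
    decide (0 < (xs.filter p).length) = xs.any p := by
  rcases h : xs.any p with _ | _
  · simp only [List.any_eq_false] at h
    have : xs.filter p = [] := List.filter_eq_nil_iff.mpr (by simpa using h)
    simp [this]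
  · rcases List.any_eq_true.mp h with ⟨a, ha, hpa⟩
    have : a ∈ xs.filter p := List.mem_filter.mpr ⟨ha, hpa⟩
    have := List.length_pos_of_mem this
    simp [this]

theorem filter_zero_iff_not_any (p : String → Bool) (xs : List String) :
    decide ((xs.filter p).length = 0) = !xs.any p := by
  rcases h : xs.any p with _ | _
  · simp only [List.any_eq_false] at h
    have : xs.filter p = [] := List.filter_eq_nil_iff.mpr (by simpa using h)
    simp [this]
  · rcases List.any_eq_true.mp h with ⟨a, ha, hpa⟩
    have : a ∈ xs.filter p := List.mem_filter.mpr ⟨ha, hpa⟩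
    have := List.length_pos_of_mem this
    simp [Nat.pos_iff_ne_zero.mp this]

theorem all_congr_mem {α : Type} {l : List α} {p q : α → Bool}
    (h : ∀ x ∈ l, p x = q x) : l.all p = l.all q := by
  induction l with
  | nil => rfl
  | cons x xs ih =>
    simp only [List.all_cons, h x List.mem_cons_self,
      ih (fun y hy => h y (List.mem_cons_of_mem x hy))]

-- ===== VERDICT (by name: the statement is the Claim_ definition above) =====
theorem is_meaningful_chunk_py_spec : Claim_equal_is_meaningful_chunk_py := by
  intro text _
  unfold Spec_is_meaningful_chunk_py is_meaningful_chunk_py is_meaningful_chunk_py_alt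
  by_cases h1 : PySem.Str.len text < 200
  · rw [if_pos h1, if_pos h1]
  rw [if_neg h1, if_neg h1]
  rw [altLoop_eq]
  set raw := (PySem.Str.split? text "\n").getD [] with hraw
  have hcl : codeOf raw = (raw.map PySem.Str.strip).filter
      (fun l => l != "" && !(PySem.Str.startswith l "#")) := rfl
  set cl := (raw.map PySem.Str.strip).filter
      (fun l => l != "" && !(PySem.Str.startswith l "#")) with hclset
  rw [hcl]
  have hne : ∀ l ∈ cl, (l == "") = false := by
    intro l hl
    have h := List.of_mem_filter hl
    simp only [Bool.and_eq_true, bne_iff_ne] at h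
    simpa using h.1
  by_cases h2 : cl.length < 3
  · rw [if_pos h2]
    have hz : decide (3 ≤ 0 + cl.length) = false := decide_eq_false (by omega)
    rw [hz]
    simp only [Bool.false_and]
  rw [if_neg h2]
  have h3 : decide (3 ≤ 0 + cl.length) = true := decide_eq_true (by omega)
  simp only [h3, Bool.true_and, Bool.false_or]
  have hchain : ∀ a b c : Bool,
      (if a then false else if b then false else if c then false else true) =
      (!a && !b && !c) := by decide
  rw [hchain]
  congr 1
  congr 1
  · -- pattern1 vs "some line is not import-like"
    conv_rhs => rw [List.any_eq_not_all_not]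
    apply congrArg
    apply all_congr_mem
    intro l hl
    simp [altImportLike, hne l hl]
  · -- pattern2 vs "some line is not an acceptable var-decl line"
    rw [all_filter']
    conv_rhs => rw [List.any_eq_not_all_not]
    apply congrArg
    apply all_congr_mem
    intro l hl
    simp [altVarDeclOk, bne, hne l hl]
  · -- pattern3 vs "has impl or no decl keyword"
    rw [filter_pos_iff_any, filter_zero_iff_not_any]
    rw [show cl.any (fun l =>
        ["class ", "interface ", "struct ", "def ", "function "].any
          (fun k => PySem.Str.isIn k l)) = cl.any altDecl from rfl]
    rw [show cl.any (fun l =>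
        PySem.Str.isIn "{" l || PySem.Str.isIn "return " l || PySem.Str.isIn "if " l) =
        cl.any altImpl from rfl]
    cases cl.any altDecl <;> cases cl.any altImpl <;> decide
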